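-- pv_equiv track=rewrite | github.com/salacoste/openapi-mcp-swagger | src/swagger_mcp_server/parser/extension_handler.py | _determine_vendor
-- ===== SOURCE A (Python) =====
-- from typing import Any, Dict, List, Optional, Set, Tuple, Union
--
-- def _determine_vendor(extension_key: str) -> Optional[str]:
--     """Determine the vendor from an extension key."""
--     ext_lower = extension_key.lower()
--
--     vendor_prefixes = {
--         "x-amazon-": "Amazon",
--         "x-aws-": "AWS",
--         "x-azure-": "Microsoft Azure",
--         "x-google-": "Google",
--         "x-microsoft-": "Microsoft",
--         "x-swagger-": "Swagger",
--         "x-redoc-": "Redoc",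
--     }
--
--     for prefix, vendor in vendor_prefixes.items():
--         if ext_lower.startswith(prefix):
--             return vendor
--
--     return None
-- ===== SOURCE B (Python) =====
-- from typing import Optional
--
-- _VENDOR_TOKENS = {
--     "amazon": "Amazon",
--     "aws": "AWS",
--     "azure": "Microsoft Azure",
--     "google": "Google",
--     "microsoft": "Microsoft",
--     "swagger": "Swagger",
--     "redoc": "Redoc",
-- }
--
-- def _determine_vendor(extension_key: str) -> Optional[str]:
--     """Determine the vendor from an extension key."""
--     ext_lower = extension_key.lower()
--     if not ext_lower.startswith("x-"):
--         return None
--     i = ext_lower.find("-", 2)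
--     if i == -1:
--         return None
--     return _VENDOR_TOKENS.get(ext_lower[2:i])
-- ===== Notes on version B (the rewrite author's own statement) =====
-- stated objective: idiomatic
-- what changed: B parses the key (require the 'x-' prefix, find the next '-', slice out the vendor token) and does one hashed dict lookup, instead of A's linear scan testing seven startswith prefixes.
import Mathlib
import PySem

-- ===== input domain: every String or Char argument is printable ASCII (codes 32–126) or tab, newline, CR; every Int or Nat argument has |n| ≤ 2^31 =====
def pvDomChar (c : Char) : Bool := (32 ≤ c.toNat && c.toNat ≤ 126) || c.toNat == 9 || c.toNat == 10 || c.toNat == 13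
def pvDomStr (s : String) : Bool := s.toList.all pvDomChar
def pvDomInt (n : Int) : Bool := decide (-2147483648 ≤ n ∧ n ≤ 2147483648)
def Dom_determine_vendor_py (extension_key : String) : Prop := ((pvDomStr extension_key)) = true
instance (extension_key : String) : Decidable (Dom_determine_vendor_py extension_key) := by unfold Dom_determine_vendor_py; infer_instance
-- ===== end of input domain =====

-- B replaces A's linear scan over seven startswith prefixes by parsing the key ("x-", next "-",
-- the token between them) and one dict lookup; equivalence is proved for all strings (idiomatic, not faster).

-- ===== PORT A =====
-- the vendor_prefixes dict literal, in its (insertion = literal) iteration order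
def pvVendorPrefixes : List (String × String) :=
  [("x-amazon-", "Amazon"), ("x-aws-", "AWS"), ("x-azure-", "Microsoft Azure"),
   ("x-google-", "Google"), ("x-microsoft-", "Microsoft"), ("x-swagger-", "Swagger"),
   ("x-redoc-", "Redoc")]

-- the for-loop over vendor_prefixes.items() with its early return
def pvVendorLoop (ext : String) : List (String × String) → Option String
  | [] => none
  | (p, v) :: rest => if PySem.Str.startswith ext p then some v else pvVendorLoop ext rest

def determine_vendor_py (extension_key : String) : Option String :=
  pvVendorLoop (PySem.Str.lower extension_key) pvVendorPrefixes

-- ===== PORT B =====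
def pvVendorTokens : PySem.Dict String String :=
  PySem.Dict.ofList
    [("amazon", "Amazon"), ("aws", "AWS"), ("azure", "Microsoft Azure"),
     ("google", "Google"), ("microsoft", "Microsoft"), ("swagger", "Swagger"),
     ("redoc", "Redoc")]

def determine_vendor_py_alt (extension_key : String) : Option String :=
  let ext := PySem.Str.lower extension_key
  if PySem.Str.startswith ext "x-" then
    let i := PySem.Str.findFrom ext "-" 2 none
    if i = -1 then none
    else pvVendorTokens.get? (PySem.Str.slice ext (some 2) (some i))
  else none

-- ===== PRECONDITION & SPEC =====
def Spec_determine_vendor_py (extension_key : String) (out : Option String) : Prop := out = determine_vendor_py_alt extension_key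
instance (extension_key : String) (out : Option String) : Decidable (Spec_determine_vendor_py extension_key out) := by unfold Spec_determine_vendor_py; infer_instance

-- ===== CLAIM (what is proved, stated in full; the proofs are below) =====
def Claim_equal_determine_vendor_py : Prop := ∀ (extension_key : String), Dom_determine_vendor_py extension_key → Spec_determine_vendor_py extension_key (determine_vendor_py extension_key)

-- ===== LEMMAS AND PROOFS =====

-- If a '-' first occurs in m at position k, then "tok-" (tok dash-free) is a prefix of m
-- exactly when tok is the first k characters of m.
theorem pv_token_core (m : List Char) (k : Nat)
    (hdash : ['-'] <+: m.drop k)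
    (hmin : ∀ j : Nat, j < k → ¬ ['-'] <+: m.drop j)
    (tok : List Char) (htok : '-' ∉ tok) :
    (tok ++ ['-']) <+: m ↔ m.take k = tok := by
  constructor
  · rintro ⟨r, rfl⟩
    have hk_le : k ≤ tok.length := by
      by_contra hlt
      push Not at hlt
      refine hmin tok.length hlt ⟨r, ?_⟩
      rw [List.append_assoc, List.drop_left]
    have hk_ge : tok.length ≤ k := by
      by_contra hlt
      push Not at hlt
      obtain ⟨t, ht⟩ := hdash
      have h1 : (tok ++ ['-'] ++ r)[k]? = some '-' := by
        have := List.getElem?_drop (xs := tok ++ ['-'] ++ r) (i := k) (j := 0)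
        rw [← ht] at this
        simpa using this.symm
      have h2 : tok[k]? = some '-' := by
        rwa [List.append_assoc, List.getElem?_append_left hlt] at h1
      exact htok (List.mem_of_getElem? h2)
    have hk : k = tok.length := le_antisymm hk_le hk_ge
    subst hk
    rw [List.append_assoc, List.take_left]
  · rintro rfl
    obtain ⟨t, ht⟩ := hdash
    refine ⟨t, ?_⟩
    rw [List.append_assoc]
    rw [show ['-'] ++ t = m.drop k from ht]
    exact List.take_append_drop k m

-- Bridge pv_token_core to the string level: s = "x-" ++ m, n the first index ≥ 2 of a '-' in s.
theorem pv_branch_iff (s : String) (m : List Char) (hm : 'x' :: '-' :: m = s.toList) (n : Nat)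
    (hdash : ['-'] <+: s.toList.drop n)
    (hmin : ∀ j : Nat, 2 ≤ j → j < n → ¬ ['-'] <+: s.toList.drop j)
    (h2n : 2 ≤ n)
    (p : String) (tok : List Char) (hp : p.toList = 'x' :: '-' :: (tok ++ ['-'])) (htok : '-' ∉ tok) :
    (PySem.Str.startswith s p = true ↔ (s.toList.drop 2).take (n - 2) = tok) := by
  have hdropj : ∀ j : Nat, s.toList.drop (j + 2) = m.drop j := by
    intro j
    rw [← hm]
    show List.drop (j + 1 + 1) _ = _
    simp
  have hdrop2 : s.toList.drop 2 = m := by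
    have := hdropj 0
    simpa using this
  have hdropn : s.toList.drop n = m.drop (n - 2) := by
    conv_lhs => rw [show n = (n - 2) + 2 by omega]
    rw [hdropj]
  have core := pv_token_core m (n - 2)
    (by rw [← hdropn]; exact hdash)
    (by
      intro j hj
      have := hmin (j + 2) (by omega) (by omega)
      rwa [hdropj] at this)
    tok htok
  rw [PySem.Str.startswith_eq, PySem.Chars.startswith_iff, hp, hdrop2, ← hm]
  simpa [List.cons_prefix_cons] using core

-- If s does not start with "x-", it starts with none of the vendor prefixes.
theorem pv_not_sw (s p : String) (hx : ¬ PySem.Str.startswith s "x-" = true)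
    (hq : "x-".toList <+: p.toList) : PySem.Str.startswith s p = false := by
  rw [Bool.eq_false_iff]
  intro htr
  apply hx
  rw [PySem.Str.startswith_eq]
  exact (PySem.Chars.startswith_iff _ _).mpr
    (hq.trans ((PySem.Chars.startswith_iff _ _).mp (by rwa [PySem.Str.startswith_eq] at htr)))

-- The heart of the equivalence: on ANY string (here the lowercased key), A's prefix loop
-- equals B's parse-and-look-up.
theorem pv_main (s : String) :
    pvVendorLoop s pvVendorPrefixes =
      (if PySem.Str.startswith s "x-" then
        (if PySem.Str.findFrom s "-" 2 none = -1 then none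
         else pvVendorTokens.get? (PySem.Str.slice s (some 2) (some (PySem.Str.findFrom s "-" 2 none))))
       else none) := by
  by_cases hx : PySem.Str.startswith s "x-" = true
  · rw [if_pos hx]
    have hpre : ['x', '-'] <+: s.toList := by
      have h0 := (PySem.Chars.startswith_iff _ _).mp (by rwa [PySem.Str.startswith_eq] at hx)
      exact (by decide : "x-".toList = ['x', '-']) ▸ h0
    obtain ⟨m, hm0⟩ := hpre
    have hm : 'x' :: '-' :: m = s.toList := by simpa using hm0
    have hlen : 2 ≤ s.toList.length := by rw [← hm]; simp
    have hff : PySem.Str.findFrom s "-" 2 none = PySem.Chars.findFrom s.toList ['-'] ((2 : Nat) : Int) none := by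
      rw [PySem.Str.findFrom_eq, show "-".toList = ['-'] from by decide]
      norm_num
    by_cases hneg : PySem.Str.findFrom s "-" 2 none = -1
    · rw [if_pos hneg]
      have hnod : ¬ ['-'] <:+: s.toList.drop 2 :=
        (PySem.Chars.findFrom_natCast_eq_neg_one_iff s.toList ['-'] 2 hlen).mp (by rw [← hff]; exact hneg)
      have fno : ∀ (p : String) (tok : List Char), p.toList = 'x' :: '-' :: (tok ++ ['-']) →
          PySem.Str.startswith s p = false := by
        intro p tok hp
        rw [Bool.eq_false_iff]
        intro htr
        apply hnod
        obtain ⟨r, hr⟩ := (PySem.Chars.startswith_iff _ _).mp (by rwa [PySem.Str.startswith_eq] at htr)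
        rw [hp] at hr
        refine ⟨tok, r, ?_⟩
        rw [← hr]
        simp
      have f1 := fno "x-amazon-" "amazon".toList (by decide)
      have f2 := fno "x-aws-" "aws".toList (by decide)
      have f3 := fno "x-azure-" "azure".toList (by decide)
      have f4 := fno "x-google-" "google".toList (by decide)
      have f5 := fno "x-microsoft-" "microsoft".toList (by decide)
      have f6 := fno "x-swagger-" "swagger".toList (by decide)
      have f7 := fno "x-redoc-" "redoc".toList (by decide)
      simp at f1 f2 f3 f4 f5 f6 f7
      simp [pvVendorLoop, pvVendorPrefixes, f1, f2, f3, f4, f5, f6, f7]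
    · rw [if_neg hneg]
      have hneg' : PySem.Chars.findFrom s.toList ['-'] ((2 : Nat) : Int) none ≠ -1 := by
        rw [← hff]; exact hneg
      obtain ⟨hge, hdash, hmin⟩ := PySem.Chars.findFrom_natCast_spec s.toList ['-'] 2 hlen hneg'
      rw [← hff] at hge hdash hmin
      have h0i : (0 : Int) ≤ PySem.Str.findFrom s "-" 2 none := le_trans (by norm_num) hge
      have h2n : 2 ≤ (PySem.Str.findFrom s "-" 2 none).toNat := by omega
      have htol : (PySem.Str.slice s (some 2) (some (PySem.Str.findFrom s "-" 2 none))).toList =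
          (s.toList.drop 2).take ((PySem.Str.findFrom s "-" 2 none).toNat - 2) := by
        rw [PySem.Str.toList_slice, PySem.Chars.slice_eq_listSlice,
            PySem.List.slice_toNat s.toList (by norm_num) h0i]
        simp
      have hne : ∀ key : String,
          (s.toList.drop 2).take ((PySem.Str.findFrom s "-" 2 none).toNat - 2) ≠ key.toList →
          key ≠ (PySem.Str.slice s (some 2) (some (PySem.Str.findFrom s "-" 2 none))) := by
        intro key hk he
        exact hk (by rw [← htol, ← he])
      have B1 := pv_branch_iff s m hm (PySem.Str.findFrom s "-" 2 none).toNat hdash hmin h2n "x-amazon-" "amazon".toList (by decide) (by decide)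
      have B2 := pv_branch_iff s m hm (PySem.Str.findFrom s "-" 2 none).toNat hdash hmin h2n "x-aws-" "aws".toList (by decide) (by decide)
      have B3 := pv_branch_iff s m hm (PySem.Str.findFrom s "-" 2 none).toNat hdash hmin h2n "x-azure-" "azure".toList (by decide) (by decide)
      have B4 := pv_branch_iff s m hm (PySem.Str.findFrom s "-" 2 none).toNat hdash hmin h2n "x-google-" "google".toList (by decide) (by decide)
      have B5 := pv_branch_iff s m hm (PySem.Str.findFrom s "-" 2 none).toNat hdash hmin h2n "x-microsoft-" "microsoft".toList (by decide) (by decide)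
      have B6 := pv_branch_iff s m hm (PySem.Str.findFrom s "-" 2 none).toNat hdash hmin h2n "x-swagger-" "swagger".toList (by decide) (by decide)
      have B7 := pv_branch_iff s m hm (PySem.Str.findFrom s "-" 2 none).toNat hdash hmin h2n "x-redoc-" "redoc".toList (by decide) (by decide)
      by_cases h1 : (s.toList.drop 2).take ((PySem.Str.findFrom s "-" 2 none).toNat - 2) = "amazon".toList
      · have e1 : PySem.Str.startswith s "x-amazon-" = true := B1.mpr h1
        have hS : PySem.Str.slice s (some 2) (some (PySem.Str.findFrom s "-" 2 none)) = "amazon" :=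
          String.toList_inj.mp (by rw [htol, h1])
        rw [hS]
        rw [show pvVendorTokens.get? "amazon" = some "Amazon" from by decide]
        simp at e1
        simp [pvVendorLoop, pvVendorPrefixes, e1]
      · have e1 : PySem.Str.startswith s "x-amazon-" = false :=
          Bool.eq_false_iff.mpr (fun hh => h1 (B1.mp hh))
        by_cases h2 : (s.toList.drop 2).take ((PySem.Str.findFrom s "-" 2 none).toNat - 2) = "aws".toList
        · have e2 : PySem.Str.startswith s "x-aws-" = true := B2.mpr h2
          have hS : PySem.Str.slice s (some 2) (some (PySem.Str.findFrom s "-" 2 none)) = "aws" :=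
            String.toList_inj.mp (by rw [htol, h2])
          rw [hS]
          rw [show pvVendorTokens.get? "aws" = some "AWS" from by decide]
          simp at e1 e2
          simp [pvVendorLoop, pvVendorPrefixes, e1, e2]
        · have e2 : PySem.Str.startswith s "x-aws-" = false :=
            Bool.eq_false_iff.mpr (fun hh => h2 (B2.mp hh))
          by_cases h3 : (s.toList.drop 2).take ((PySem.Str.findFrom s "-" 2 none).toNat - 2) = "azure".toList
          · have e3 : PySem.Str.startswith s "x-azure-" = true := B3.mpr h3
            have hS : PySem.Str.slice s (some 2) (some (PySem.Str.findFrom s "-" 2 none)) = "azure" :=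
              String.toList_inj.mp (by rw [htol, h3])
            rw [hS]
            rw [show pvVendorTokens.get? "azure" = some "Microsoft Azure" from by decide]
            simp at e1 e2 e3
            simp [pvVendorLoop, pvVendorPrefixes, e1, e2, e3]
          · have e3 : PySem.Str.startswith s "x-azure-" = false :=
              Bool.eq_false_iff.mpr (fun hh => h3 (B3.mp hh))
            by_cases h4 : (s.toList.drop 2).take ((PySem.Str.findFrom s "-" 2 none).toNat - 2) = "google".toList
            · have e4 : PySem.Str.startswith s "x-google-" = true := B4.mpr h4
              have hS : PySem.Str.slice s (some 2) (some (PySem.Str.findFrom s "-" 2 none)) = "google" :=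
                String.toList_inj.mp (by rw [htol, h4])
              rw [hS]
              rw [show pvVendorTokens.get? "google" = some "Google" from by decide]
              simp at e1 e2 e3 e4
              simp [pvVendorLoop, pvVendorPrefixes, e1, e2, e3, e4]
            · have e4 : PySem.Str.startswith s "x-google-" = false :=
                Bool.eq_false_iff.mpr (fun hh => h4 (B4.mp hh))
              by_cases h5 : (s.toList.drop 2).take ((PySem.Str.findFrom s "-" 2 none).toNat - 2) = "microsoft".toList
              · have e5 : PySem.Str.startswith s "x-microsoft-" = true := B5.mpr h5
                have hS : PySem.Str.slice s (some 2) (some (PySem.Str.findFrom s "-" 2 none)) = "microsoft" :=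
                  String.toList_inj.mp (by rw [htol, h5])
                rw [hS]
                rw [show pvVendorTokens.get? "microsoft" = some "Microsoft" from by decide]
                simp at e1 e2 e3 e4 e5
                simp [pvVendorLoop, pvVendorPrefixes, e1, e2, e3, e4, e5]
              · have e5 : PySem.Str.startswith s "x-microsoft-" = false :=
                  Bool.eq_false_iff.mpr (fun hh => h5 (B5.mp hh))
                by_cases h6 : (s.toList.drop 2).take ((PySem.Str.findFrom s "-" 2 none).toNat - 2) = "swagger".toList
                · have e6 : PySem.Str.startswith s "x-swagger-" = true := B6.mpr h6
                  have hS : PySem.Str.slice s (some 2) (some (PySem.Str.findFrom s "-" 2 none)) = "swagger" :=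
                    String.toList_inj.mp (by rw [htol, h6])
                  rw [hS]
                  rw [show pvVendorTokens.get? "swagger" = some "Swagger" from by decide]
                  simp at e1 e2 e3 e4 e5 e6
                  simp [pvVendorLoop, pvVendorPrefixes, e1, e2, e3, e4, e5, e6]
                · have e6 : PySem.Str.startswith s "x-swagger-" = false :=
                    Bool.eq_false_iff.mpr (fun hh => h6 (B6.mp hh))
                  by_cases h7 : (s.toList.drop 2).take ((PySem.Str.findFrom s "-" 2 none).toNat - 2) = "redoc".toList
                  · have e7 : PySem.Str.startswith s "x-redoc-" = true := B7.mpr h7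
                    have hS : PySem.Str.slice s (some 2) (some (PySem.Str.findFrom s "-" 2 none)) = "redoc" :=
                      String.toList_inj.mp (by rw [htol, h7])
                    rw [hS]
                    rw [show pvVendorTokens.get? "redoc" = some "Redoc" from by decide]
                    simp at e1 e2 e3 e4 e5 e6 e7
                    simp [pvVendorLoop, pvVendorPrefixes, e1, e2, e3, e4, e5, e6, e7]
                  · have e7 : PySem.Str.startswith s "x-redoc-" = false :=
                      Bool.eq_false_iff.mpr (fun hh => h7 (B7.mp hh))
                    have g1 := hne "amazon" h1
                    have g2 := hne "aws" h2
                    have g3 := hne "azure" h3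
                    have g4 := hne "google" h4
                    have g5 := hne "microsoft" h5
                    have g6 := hne "swagger" h6
                    have g7 := hne "redoc" h7
                    simp at g1 g2 g3 g4 g5 g6 g7
                    have hD : pvVendorTokens = ⟨[("amazon", "Amazon"), ("aws", "AWS"), ("azure", "Microsoft Azure"), ("google", "Google"), ("microsoft", "Microsoft"), ("swagger", "Swagger"), ("redoc", "Redoc")]⟩ := by decide
                    rw [hD]
                    simp at e1 e2 e3 e4 e5 e6 e7
                    simp [pvVendorLoop, pvVendorPrefixes, e1, e2, e3, e4, e5, e6, e7, PySem.Dict.get?, g1, g2, g3, g4, g5, g6, g7]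
  · rw [if_neg hx]
    have f1 := pv_not_sw s "x-amazon-" hx (by decide)
    have f2 := pv_not_sw s "x-aws-" hx (by decide)
    have f3 := pv_not_sw s "x-azure-" hx (by decide)
    have f4 := pv_not_sw s "x-google-" hx (by decide)
    have f5 := pv_not_sw s "x-microsoft-" hx (by decide)
    have f6 := pv_not_sw s "x-swagger-" hx (by decide)
    have f7 := pv_not_sw s "x-redoc-" hx (by decide)
    simp at f1 f2 f3 f4 f5 f6 f7
    simp [pvVendorLoop, pvVendorPrefixes, f1, f2, f3, f4, f5, f6, f7]

theorem determine_vendor_py_spec : Claim_equal_determine_vendor_py := by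
  intro ek _
  show determine_vendor_py ek = determine_vendor_py_alt ek
  simp only [determine_vendor_py, determine_vendor_py_alt]
  exact pv_main (PySem.Str.lower ek)
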